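-- pv_equiv track=rewrite | github.com/spark-kobayashi-arata/ReinVisionOCR | dataset_generator/common.py | split_text_lines
-- ===== SOURCE A (Python) =====
-- def split_text_lines(text:str, new_line_pos:int, insert_text:str) -> list[str]:
--     """テキストを行ごとに分割して返す
--
--     Args:
--         text (str): _description_
--         new_line_pos (int): 改行位置
--         insert_text (str): 改行後、先頭に挿入する文字
--
--         Returns:
--         list[str]: _description_
--     """
--     text_lines:list[str] = []
--     text_line = ""
--     counter = 0
--
--     for char in text:
--         if counter >= new_line_pos:
--             text_lines.append(text_line)
--             text_line = insert_text
--             counter = len(insert_text)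
--         text_line += char
--         counter += 1
--
--     text_lines.append(text_line)
--
--     return text_lines
-- ===== SOURCE B (Python) =====
-- def split_text_lines(text: str, new_line_pos: int, insert_text: str) -> list[str]:
--     head = max(new_line_pos, 0)
--     step = max(1, new_line_pos - len(insert_text))
--     lines = [text[:head]]
--     rest = text[head:]
--     while rest:
--         lines.append(insert_text + rest[:step])
--         rest = rest[step:]
--     return lines
-- ===== Notes on version B (the rewrite author's own statement) =====
-- stated objective: simpler
-- what changed: B computes the first line by one clamped slice and then emits continuation lines by slicing fixed-size jumps of max(1, new_line_pos - len(insert_text)) characters, instead of A's char-by-char accumulation with a running counter.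
import Mathlib
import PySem

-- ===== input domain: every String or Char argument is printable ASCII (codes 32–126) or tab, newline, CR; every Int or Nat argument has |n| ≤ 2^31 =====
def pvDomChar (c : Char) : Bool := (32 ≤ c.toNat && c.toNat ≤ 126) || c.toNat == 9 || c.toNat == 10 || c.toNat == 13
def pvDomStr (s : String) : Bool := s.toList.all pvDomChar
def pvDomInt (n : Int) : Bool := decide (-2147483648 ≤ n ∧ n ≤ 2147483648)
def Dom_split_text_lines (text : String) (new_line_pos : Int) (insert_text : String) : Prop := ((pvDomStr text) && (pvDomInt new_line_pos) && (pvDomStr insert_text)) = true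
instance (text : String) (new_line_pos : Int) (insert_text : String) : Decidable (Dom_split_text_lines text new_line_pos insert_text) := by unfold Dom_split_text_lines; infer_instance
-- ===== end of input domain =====

-- B replaces A's per-character accumulator loop with slice-based chunking (first line one
-- clamped slice, then fixed-size jumps); objective: simpler. Same return value, no speed claim.

-- ===== PORT A =====
-- A's loop: state (text_lines, text_line, counter); strings are held as List Char and turned
-- into String exactly where A appends a line.
def split_text_lines (text : String) (new_line_pos : Int) (insert_text : String) : List String :=
  let fin := text.toList.foldl
    (fun (st : List String × List Char × Int) c =>
      let st' :=
        if st.2.2 ≥ new_line_pos then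
          (st.1 ++ [String.mk st.2.1], insert_text.toList, (insert_text.toList.length : Int))
        else st
      (st'.1, st'.2.1 ++ [c], st'.2.2 + 1))
    ([], [], 0)
  fin.1 ++ [String.mk fin.2.1]

-- ===== PORT B =====
-- the while loop of Source B: step = k+1 = max 1 (new_line_pos - len insert_text); rest[:step]/rest[step:]
-- on a nonnegative step are exactly take/drop
def pvAltLoop (ins : List Char) (k : Nat) : List Char → List String
  | [] => []
  | x :: xs =>
    String.mk (ins ++ (x :: xs).take (k + 1)) :: pvAltLoop ins k ((x :: xs).drop (k + 1))
termination_by rest => rest.length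
decreasing_by simp

def split_text_lines_alt (text : String) (new_line_pos : Int) (insert_text : String) : List String :=
  -- head = max(new_line_pos, 0) ≥ 0, so text[:head]/text[head:] are exactly take/drop
  let head := (max new_line_pos 0).toNat
  -- Python's max(1, new_line_pos - len(insert_text)) equals k+1 with this k (exact for all Int)
  let k := (new_line_pos - (insert_text.toList.length : Int) - 1).toNat
  String.mk (text.toList.take head) :: pvAltLoop insert_text.toList k (text.toList.drop head)

-- ===== PRECONDITION & SPEC =====
def Spec_split_text_lines (text : String) (new_line_pos : Int) (insert_text : String) (out : List String) : Prop := out = split_text_lines_alt text new_line_pos insert_text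
instance (text : String) (new_line_pos : Int) (insert_text : String) (out : List String) : Decidable (Spec_split_text_lines text new_line_pos insert_text out) := by unfold Spec_split_text_lines; infer_instance

-- ===== CLAIM (what is proved, stated in full; the proofs are below) =====
def Claim_equal_split_text_lines : Prop := ∀ (text : String) (new_line_pos : Int) (insert_text : String), Dom_split_text_lines text new_line_pos insert_text → Spec_split_text_lines text new_line_pos insert_text (split_text_lines text new_line_pos insert_text)

-- ===== LEMMAS AND PROOFS =====

-- A's loop body, named (definitionally equal to the lambda in the port)
def pvStepA (P : Int) (L : List Char) (st : List String × List Char × Int) (ch : Char) :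
    List String × List Char × Int :=
  let st' := if st.2.2 ≥ P then (st.1 ++ [String.mk st.2.1], L, (L.length : Int)) else st
  (st'.1, st'.2.1 ++ [ch], st'.2.2 + 1)

-- A's loop as a tail recursion on the remaining characters (lines prefix factored out)
def pvRunA (P : Int) (L : List Char) : List Char → List Char → Int → List String
  | [], line, _ => [String.mk line]
  | x :: xs, line, c =>
    if c ≥ P then String.mk line :: pvRunA P L xs (L ++ [x]) ((L.length : Int) + 1)
    else pvRunA P L xs (line ++ [x]) (c + 1)

lemma pvAltLoop_nil (ins : List Char) (k : Nat) : pvAltLoop ins k [] = [] := by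
  conv_lhs => unfold pvAltLoop

lemma pvAltLoop_cons (ins : List Char) (k : Nat) (x : Char) (xs : List Char) :
    pvAltLoop ins k (x :: xs) =
      String.mk (ins ++ (x :: xs).take (k + 1)) :: pvAltLoop ins k ((x :: xs).drop (k + 1)) := by
  conv_lhs => unfold pvAltLoop

lemma pvFoldA (P : Int) (L : List Char) :
    ∀ (cs : List Char) (lines : List String) (line : List Char) (c : Int),
      (cs.foldl (pvStepA P L) (lines, line, c)).1 ++
        [String.mk (cs.foldl (pvStepA P L) (lines, line, c)).2.1]
      = lines ++ pvRunA P L cs line c := by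
  intro cs
  induction cs with
  | nil => intro lines line c; simp [pvRunA]
  | cons x xs ih =>
    intro lines line c
    rw [List.foldl_cons]
    by_cases h : c ≥ P
    · have hs : pvStepA P L (lines, line, c) x
          = (lines ++ [String.mk line], L ++ [x], (L.length : Int) + 1) := by
        simp [pvStepA, h]
      rw [hs, ih]
      simp [pvRunA, h]
    · have hs : pvStepA P L (lines, line, c) x = (lines, line ++ [x], c + 1) := by
        simp [pvStepA, h]
      rw [hs, ih]
      simp [pvRunA, h]

lemma pvSplitA_eq (text : String) (P : Int) (ins : String) :
    split_text_lines text P ins = pvRunA P ins.toList text.toList [] 0 := by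
  have h := pvFoldA P ins.toList text.toList [] [] 0
  simpa using h

lemma pvSplitB_eq (text : String) (P : Int) (ins : String) :
    split_text_lines_alt text P ins =
      String.mk (text.toList.take (max P 0).toNat) ::
        pvAltLoop ins.toList ((P - (ins.toList.length : Int) - 1).toNat)
          (text.toList.drop (max P 0).toNat) := rfl

lemma pvAbsorb_no_flush (P : Int) (L : List Char) :
    ∀ (rest line : List Char) (c : Int), c + rest.length ≤ P →
      pvRunA P L rest line c = [String.mk (line ++ rest)] := by
  intro rest
  induction rest with
  | nil => intro line c _; simp [pvRunA]
  | cons x xs ih =>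
    intro line c h
    have hc : ¬ c ≥ P := by simp at h ⊢; omega
    simp only [pvRunA, if_neg hc]
    rw [ih (line ++ [x]) (c + 1) (by simp at h ⊢; omega)]
    simp

lemma pvAbsorb_to_P (P : Int) (L : List Char) :
    ∀ (m : Nat) (rest line : List Char) (c : Int), c + m = P → m ≤ rest.length → 1 ≤ m →
      pvRunA P L rest line c = pvRunA P L (rest.drop m) (line ++ rest.take m) P := by
  intro m
  induction m with
  | zero => intro _ _ _ _ _ h; omega
  | succ n ih =>
    intro rest line c hc hlen _
    match rest with
    | [] => simp at hlen
    | x :: xs =>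
      have hclt : ¬ c ≥ P := by omega
      simp only [pvRunA, if_neg hclt]
      by_cases hn : n = 0
      · subst hn
        have : c + 1 = P := by omega
        simp [this]
      · rw [ih xs (line ++ [x]) (c + 1) (by omega) (by simp at hlen; omega) (by omega)]
        simp

lemma pvCont (P : Int) (L : List Char) :
    ∀ (n : Nat) (rest : List Char), rest.length ≤ n → rest ≠ [] →
      ∀ (line : List Char) (c : Int), c ≥ P →
        pvRunA P L rest line c =
          String.mk line :: pvAltLoop L ((P - (L.length : Int) - 1).toNat) rest := by
  intro n
  induction n with
  | zero => intro rest h hne; cases rest <;> simp_all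
  | succ n ih =>
    intro rest hlen hne line c hc
    match rest with
    | [] => exact absurd rfl hne
    | x :: xs =>
      set k := (P - (L.length : Int) - 1).toNat with hk
      simp only [pvRunA, if_pos hc]
      congr 1
      rw [pvAltLoop_cons]
      by_cases hP : (L.length : Int) + 1 ≥ P
      · -- step is 1: k = 0
        have hk0 : k = 0 := by omega
        rw [hk0]
        simp only [List.take, List.drop]
        match xs with
        | [] => simp [pvRunA, pvAltLoop_nil]
        | y :: ys =>
          rw [ih (y :: ys) (by simp at hlen ⊢; omega) (by simp) (L ++ [x]) ((L.length : Int) + 1) hP]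
          rw [hk0]
      · have hk1 : 1 ≤ k := by omega
        have hck : ((L.length : Int) + 1) + (k : Int) = P := by omega
        by_cases hshort : xs.length ≤ k
        · -- the remaining text fits in this line
          rw [pvAbsorb_no_flush P L xs (L ++ [x]) ((L.length : Int) + 1) (by omega)]
          have ht : (x :: xs).take (k + 1) = x :: xs := by
            apply List.take_of_length_le; simp; omega
          have hd : (x :: xs).drop (k + 1) = [] := by
            apply List.drop_eq_nil_of_le; simp; omega
          rw [ht, hd, pvAltLoop_nil]
          simp
        · rw [pvAbsorb_to_P P L k xs (L ++ [x]) ((L.length : Int) + 1) hck (by omega) hk1]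
          have hdne : xs.drop k ≠ [] := by
            simp [List.drop_eq_nil_iff]; omega
          rw [ih (xs.drop k) (by simp at hlen ⊢; omega) hdne _ P (le_refl P)]
          simp

-- ===== VERDICT (by name: the statement is the Claim_ definition above) =====
theorem split_text_lines_spec : Claim_equal_split_text_lines := by
  intro text P ins _
  unfold Spec_split_text_lines
  rw [pvSplitA_eq, pvSplitB_eq]
  set cs := text.toList with hcs
  set L := ins.toList with hL
  by_cases hP : P ≤ 0
  · have hhead : (max P 0).toNat = 0 := by omega
    rw [hhead]
    match h : cs with
    | [] => simp [pvRunA, pvAltLoop_nil]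
    | x :: xs =>
      rw [pvCont P L (x :: xs).length (x :: xs) (le_refl _) (by simp) [] 0 (by omega)]
      simp
  · push_neg at hP
    have hhead : ((max P 0).toNat : Int) = P := by omega
    set m := (max P 0).toNat with hm
    by_cases hshort : cs.length ≤ m
    · rw [pvAbsorb_no_flush P L cs [] 0 (by omega)]
      have hd : cs.drop m = [] := List.drop_eq_nil_of_le hshort
      have ht : cs.take m = cs := List.take_of_length_le hshort
      rw [hd, ht, pvAltLoop_nil]
      simp
    · push_neg at hshort
      rw [pvAbsorb_to_P P L m cs [] 0 (by omega) (by omega) (by omega)]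
      have hdne : cs.drop m ≠ [] := by simp [List.drop_eq_nil_iff]; omega
      rw [pvCont P L (cs.drop m).length (cs.drop m) (le_refl _) hdne _ P (le_refl P)]
      simp
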